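-- pv_equiv track=rewrite | github.com/Sangmin627/AlgoStudy2023 | 상진/Programmers/Level2/메뉴 리뉴얼.py | solution
-- ===== SOURCE A (Python) =====
-- from itertools import combinations
--
-- def solution(orders, course):
--     answer = []
--     odict = dict()
--
--     for order in orders:
--         for i in range(2, len(order) + 1):
--             comb = list(combinations(sorted(order), i))
--             for c in comb:
--                 cs = "".join(c)
--                 if cs not in odict.keys():
--                     odict[cs] = 1
--                 else:
--                     odict[cs] += 1
--
--     for c in course:
--         tmps = []
--         for key in odict.keys():
--             if len(key) == c and odict[key] >= 2:
--                 tmps.append([odict[key], key])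
--
--         tmps.sort(reverse=True)
--         if not tmps:
--             continue
--
--         max_count = tmps[0][0]
--         for tmp in tmps:
--             if tmp[0] < max_count:
--                 break
--             answer.append(tmp[1])
--
--     answer.sort()
--     return answer
-- ===== SOURCE B (Python) =====
-- from itertools import combinations
--
--
-- def solution(orders, course):
--     cnt = {}
--     for order in orders:
--         for i in range(2, len(order) + 1):
--             for c in combinations(sorted(order), i):
--                 cs = "".join(c)
--                 cnt[cs] = cnt.get(cs, 0) + 1
--
--     buckets = {}
--     for k, v in cnt.items():
--         buckets.setdefault(len(k), []).append((k, v))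
--
--     answer = []
--     for c in course:
--         bucket = buckets.get(c, [])
--         m = 0
--         for _, v in bucket:
--             if v > m:
--                 m = v
--         if m >= 2:
--             answer += [k for k, v in bucket if v == m]
--
--     answer.sort()
--     return answer
-- ===== Notes on version B (the rewrite author's own statement) =====
-- stated objective: alternative
-- what changed: The second phase no longer re-scans the whole combination counter for every course length and sorts candidate [count, key] pairs in reverse with a break loop; instead B builds a length-indexed bucket dict once, then for each course length takes only its bucket, computes the maximum count with a running max, and filters the keys at that maximum, relying on the final sort for ordering.
import Mathlib
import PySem

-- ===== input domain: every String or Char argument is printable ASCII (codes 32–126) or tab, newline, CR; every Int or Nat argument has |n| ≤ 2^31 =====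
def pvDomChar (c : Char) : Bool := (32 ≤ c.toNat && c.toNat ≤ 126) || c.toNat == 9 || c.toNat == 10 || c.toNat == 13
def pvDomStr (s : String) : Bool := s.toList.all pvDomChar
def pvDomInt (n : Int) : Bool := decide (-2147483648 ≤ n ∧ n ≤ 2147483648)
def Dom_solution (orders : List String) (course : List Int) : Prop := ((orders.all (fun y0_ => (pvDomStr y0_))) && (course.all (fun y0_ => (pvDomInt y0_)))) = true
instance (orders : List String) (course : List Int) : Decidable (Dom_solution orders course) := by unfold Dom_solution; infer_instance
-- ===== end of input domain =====

-- B replaces A's per-course full scan of the combination counter (plus a reverse sort with a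
-- break loop) by a length-indexed bucket built once, a running maximum and a filter; the final
-- global sort is kept.  Objective: alternative (bucket index instead of repeated dict scans).
-- Both ports model the combination counter as Std.TreeMap String Int; its key iteration order
-- (sorted) differs from CPython's dict insertion order, which provably cannot affect the returned
-- value: A sorts the candidate pairs (distinct string keys, so a strict total order) before use,
-- both sides keep every tie at the maximal count, and the final answer.sort() canonicalises.

-- ===== PORT A =====
-- 'if cs not in odict.keys(): odict[cs] = 1 else: odict[cs] += 1'
def solDictUpd (d : Std.TreeMap String Int) (c : List Char) : Std.TreeMap String Int :=
  let cs := String.ofList c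
  if d.contains cs = false then d.insert cs 1 else d.insert cs (d.getD cs 0 + 1)

-- the double loop filling odict
def solPhase1 (orders : List String) : Std.TreeMap String Int :=
  orders.foldl (fun od order =>
    (PySem.List.pyRange 2 (PySem.Str.len order + 1) 1).foldl (fun od i =>
      (PySem.List.combinations (PySem.List.sorted order.toList (fun x => x) false) i.toNat).foldl
        solDictUpd od) od) Std.TreeMap.empty

-- 'for tmp in tmps: if tmp[0] < max_count: break ; answer.append(tmp[1])'
def solAppendLoop (maxc : Int) : List (Int × String) → List String → List String
  | [], ans => ans
  | t :: ts, ans => if t.1 < maxc then ans else solAppendLoop maxc ts (ans ++ [t.2])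

def solution (orders : List String) (course : List Int) : List String :=
  let odict := solPhase1 orders
  let answer := course.foldl (fun answer c =>
    let tmps : List (Int × String) := odict.keys.foldl (fun tmps key =>
        if PySem.Str.len key = c ∧ odict.getD key 0 ≥ 2
        then tmps ++ [(odict.getD key 0, key)] else tmps) []
    let st := PySem.List.sorted2 tmps (fun t => t.1) (fun t => t.2) true
    match st with
    | [] => answer                       -- 'if not tmps: continue'
    | t0 :: _ => solAppendLoop t0.1 st answer) []
  PySem.List.sorted answer (fun x => x) false

-- ===== PORT B =====
-- 'cnt[cs] = cnt.get(cs, 0) + 1'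
def solAltUpd (d : Std.TreeMap String Int) (c : List Char) : Std.TreeMap String Int :=
  let cs := String.ofList c
  d.insert cs (d.getD cs 0 + 1)

def solAltPhase1 (orders : List String) : Std.TreeMap String Int :=
  orders.foldl (fun d order =>
    (PySem.List.pyRange 2 (PySem.Str.len order + 1) 1).foldl (fun d i =>
      (PySem.List.combinations (PySem.List.sorted order.toList (fun x => x) false) i.toNat).foldl
        solAltUpd d) d) Std.TreeMap.empty

def solution_alt (orders : List String) (course : List Int) : List String :=
  let cnt := solAltPhase1 orders
  -- 'buckets.setdefault(len(k), []).append((k, v))'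
  let buckets : PySem.Dict Int (List (String × Int)) :=
    cnt.toList.foldl (fun b p => b.modify (PySem.Str.len p.1) [] (fun l => l ++ [p]))
      PySem.Dict.empty
  let answer := course.foldl (fun answer c =>
    let bucket := buckets.getD c []
    let m := bucket.foldl (fun m p => if p.2 > m then p.2 else m) (0 : Int)
    if m ≥ 2 then answer ++ (bucket.filter (fun p => p.2 == m)).map (fun p => p.1) else answer) []
  PySem.List.sorted answer (fun x => x) false

-- ===== PRECONDITION & SPEC =====
def Spec_solution (orders : List String) (course : List Int) (out : List String) : Prop := out = solution_alt orders course
instance (orders : List String) (course : List Int) (out : List String) : Decidable (Spec_solution orders course out) := by unfold Spec_solution; infer_instance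

-- ===== CLAIM (what is proved, stated in full; the proofs are below) =====
def Claim_equal_solution : Prop := ∀ (orders : List String) (course : List Int), Dom_solution orders course → Spec_solution orders course (solution orders course)

-- ===== LEMMAS AND PROOFS =====

-- the two dict updates agree
lemma solUpd_eq : solDictUpd = solAltUpd := by
  funext d c
  simp only [solDictUpd, solAltUpd]
  by_cases h : d.contains (String.ofList c) = true
  · simp [h]
  · have h' : d.contains (String.ofList c) = false := by
      cases hb : d.contains (String.ofList c)
      · rfl
      · exact absurd hb h
    rw [if_pos h', Std.TreeMap.getD_eq_fallback_of_contains_eq_false h']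
    norm_num

lemma solPhase1_eq (orders : List String) : solPhase1 orders = solAltPhase1 orders := by
  unfold solPhase1 solAltPhase1
  rw [solUpd_eq]

-- A's per-course candidate list, characterised on the items of the counter
lemma tmps_eq (D : Std.TreeMap String Int) (c : Int) :
    D.keys.foldl (fun tmps key =>
        if PySem.Str.len key = c ∧ D.getD key 0 ≥ 2
        then tmps ++ [(D.getD key 0, key)] else tmps) [] =
      (D.toList.filter (fun p => decide (PySem.Str.len p.1 = c ∧ p.2 ≥ 2))).map
        (fun p => (p.2, p.1)) := by
  rw [← Std.TreeMap.map_fst_toList_eq_keys, List.foldl_map]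
  rw [PySem.List.foldl_congr_mem _ _
    (fun tmps (p : String × Int) =>
      if PySem.Str.len p.1 = c ∧ p.2 ≥ 2 then tmps ++ [(p.2, p.1)] else tmps) _ ?_]
  · rw [PySem.List.foldl_append_ite (fun (p : String × Int) => PySem.Str.len p.1 = c ∧ p.2 ≥ 2)
      (fun (p : String × Int) => (p.2, p.1))]
    simp
  · intro acc p hp
    have hmem : (p.1, p.2) ∈ D.toList := by simpa using hp
    have hget : D[p.1]? = some p.2 := (Std.TreeMap.mem_toList_iff_getElem?_eq_some).1 hmem
    rw [Std.TreeMap.getD_eq_getD_getElem?, hget]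
    rfl

-- B's bucket for course length c is the length-c slice of the counter's items
lemma bucket_eq (l : List (String × Int)) (c : Int) :
    (l.foldl (fun b p => b.modify (PySem.Str.len p.1) [] (fun l => l ++ [p]))
        (PySem.Dict.empty : PySem.Dict Int (List (String × Int)))).getD c [] =
      l.filter (fun p => PySem.Str.len p.1 == c) := by
  have h : l.foldl (fun b p => b.modify (PySem.Str.len p.1) [] (fun l => l ++ [p]))
      (PySem.Dict.empty : PySem.Dict Int (List (String × Int)))
      = (l.map (fun p => ((PySem.Str.len p.1 : Int), p))).foldl
          (fun b q => b.modify q.1 [] (fun l => l ++ [q.2])) PySem.Dict.empty := by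
    rw [List.foldl_map]
  rw [h, PySem.Dict.getD_foldl_modify_append]
  simp [List.filter_map, Function.comp_def]

-- sorted2 with reverse=True is weakly descending in the first key
lemma insertBy_pairwise (before : Int × String → Int × String → Bool)
    (h1 : ∀ a b, before a b = true → b.1 ≤ a.1)
    (h2 : ∀ a b, before a b = false → a.1 ≤ b.1)
    (x : Int × String) (l : List (Int × String))
    (hl : l.Pairwise (fun a b => b.1 ≤ a.1)) :
    (PySem.List.insertBy before x l).Pairwise (fun a b => b.1 ≤ a.1) := by
  induction l with
  | nil => simp [PySem.List.insertBy]
  | cons y ys ih =>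
    rcases (List.pairwise_cons).1 hl with ⟨hy, hys⟩
    cases hb : before x y with
    | true =>
      simp only [PySem.List.insertBy, hb]
      refine List.Pairwise.cons ?_ hl
      intro b hbmem
      rcases List.mem_cons.1 hbmem with rfl | hbys
      · exact h1 _ _ hb
      · exact le_trans (hy _ hbys) (h1 _ _ hb)
    | false =>
      simp only [PySem.List.insertBy, hb]
      refine List.Pairwise.cons ?_ (ih hys)
      intro b hbmem
      rcases (PySem.List.mem_insertBy _ _ _ _).1 hbmem with rfl | hbys
      · exact h2 _ _ hb
      · exact hy _ hbys

lemma sorted2_rev_pairwise_fst (xs : List (Int × String)) :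
    (PySem.List.sorted2 xs (fun t => t.1) (fun t => t.2) true).Pairwise
      (fun a b => b.1 ≤ a.1) := by
  have key : ∀ (acc : List (Int × String)),
      acc.Pairwise (fun a b => b.1 ≤ a.1) →
      ∀ (l : List (Int × String)),
      (l.foldl (fun acc x => PySem.List.insertBy
        (fun a b => decide (b.1 < a.1) || (!decide (a.1 < b.1) && decide (b.2 < a.2))) x acc) acc).Pairwise
        (fun a b => b.1 ≤ a.1) := by
    intro acc hacc l
    induction l generalizing acc with
    | nil => simpa using hacc
    | cons x xs ih =>
      apply ih
      apply insertBy_pairwise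
      · intro a b hb
        by_cases h : b.1 ≤ a.1
        · exact h
        · exfalso
          have h1 : decide (b.1 < a.1) = false := by simp only [decide_eq_false_iff_not]; omega
          have h2 : (!decide (a.1 < b.1)) = false := by
            simp only [Bool.not_eq_false', decide_eq_true_eq]; omega
          rw [h1, h2, Bool.false_and, Bool.or_false] at hb
          exact Bool.false_ne_true hb
      · intro a b hb
        by_cases h : a.1 ≤ b.1
        · exact h
        · exfalso
          have h1 : decide (b.1 < a.1) = true := by simp only [decide_eq_true_eq]; omega
          rw [h1, Bool.true_or] at hb
          exact absurd hb (by simp)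
      · exact hacc
  exact key [] List.Pairwise.nil xs

-- on a weakly descending list, the break loop keeps exactly the elements ≥ m
lemma takeWhile_eq_filter_of_desc (m : Int) (l : List (Int × String))
    (h : l.Pairwise (fun a b => b.1 ≤ a.1)) :
    l.takeWhile (fun t => !decide (t.1 < m)) = l.filter (fun t => decide (m ≤ t.1)) := by
  induction l with
  | nil => simp
  | cons a l ih =>
    rcases (List.pairwise_cons).1 h with ⟨ha, hl⟩
    by_cases hm : a.1 < m
    · have h2 : ¬ m ≤ a.1 := by omega
      have hnil : List.filter (fun t => decide (m ≤ t.1)) l = [] := by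
        rw [List.filter_eq_nil_iff]
        intro b hb
        have := ha b hb
        simp only [decide_eq_true_eq]
        omega
      simp [hm, h2, hnil]
    · have h2 : m ≤ a.1 := by omega
      simp [hm, h2, ih hl]

lemma solAppendLoop_eq (maxc : Int) (l : List (Int × String)) (ans : List String) :
    solAppendLoop maxc l ans = ans ++ (l.takeWhile (fun t => !decide (t.1 < maxc))).map (fun t => t.2) := by
  induction l generalizing ans with
  | nil => simp [solAppendLoop]
  | cons t ts ih =>
    by_cases h : t.1 < maxc
    · simp [solAppendLoop, h]
    · simp [solAppendLoop, h, ih]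

lemma foldl_max_mem (l : List Int) (a : Int) : l.foldl max a = a ∨ l.foldl max a ∈ l := by
  induction l generalizing a with
  | nil => left; rfl
  | cons x xs ih =>
    rcases ih (max a x) with h | h
    · rcases max_choice a x with hc | hc
      · left; rw [List.foldl_cons, h]; exact hc
      · right; rw [List.foldl_cons, h, hc]; exact List.mem_cons_self
    · right; rw [List.foldl_cons]; exact List.mem_cons_of_mem _ h

lemma intBeq (a b : Int) : (a == b) = decide (a = b) := by
  by_cases h : a = b <;> simp [h]

-- the per-course segments
def segA (items : List (String × Int)) (c : Int) : List String :=
  let tmps := (items.filter (fun p => decide (PySem.Str.len p.1 = c ∧ p.2 ≥ 2))).map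
        (fun p => (p.2, p.1))
  let st := PySem.List.sorted2 tmps (fun t => t.1) (fun t => t.2) true
  match st with
  | [] => []
  | t0 :: _ => (st.takeWhile (fun t => !decide (t.1 < t0.1))).map (fun t => t.2)

def segB (items : List (String × Int)) (c : Int) : List String :=
  let bucket := items.filter (fun p => PySem.Str.len p.1 == c)
  let m := bucket.foldl (fun m p => if p.2 > m then p.2 else m) (0 : Int)
  if m ≥ 2 then (bucket.filter (fun p => p.2 == m)).map (fun p => p.1) else []

lemma seg_perm (items : List (String × Int)) (c : Int) :
    (segA items c).Perm (segB items c) := by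
  classical
  simp only [segA, segB]
  set bucket := items.filter (fun p => PySem.Str.len p.1 == c) with hbucket
  set m := bucket.foldl (fun m p => if p.2 > m then p.2 else m) (0 : Int) with hm
  have hstep : (fun (m : Int) (p : String × Int) => if p.2 > m then p.2 else m)
      = (fun (m : Int) (p : String × Int) => max m p.2) := by
    funext m p
    by_cases h : p.2 > m
    · simp [h]; omega
    · simp [h]; omega
  have hmmax : m = (bucket.map (fun p => p.2)).foldl max 0 := by
    rw [hm, hstep, List.foldl_map]
  have hub : ∀ p ∈ bucket, p.2 ≤ m := by
    intro p hp
    rw [hmmax]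
    exact (PySem.List.le_foldl_max _ 0).2 _ (List.mem_map_of_mem hp)
  have hfilt : items.filter (fun p => decide (PySem.Str.len p.1 = c ∧ p.2 ≥ 2))
      = bucket.filter (fun p => decide (2 ≤ p.2)) := by
    rw [hbucket, List.filter_filter]
    apply List.filter_congr
    intro p hp
    by_cases h1 : PySem.Str.len p.1 = c <;> by_cases h2 : (2 : Int) ≤ p.2 <;>
      simp [h2, ge_iff_le, intBeq]
  by_cases hm2 : (2 : Int) ≤ m
  · -- some bucket entry attains m
    have hmem : ∃ p ∈ bucket, p.2 = m := by
      rcases foldl_max_mem (bucket.map (fun p => p.2)) 0 with h0 | hmem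
      · rw [← hmmax] at h0; omega
      · rw [← hmmax] at hmem
        rcases List.mem_map.1 hmem with ⟨p, hp, hpm⟩
        exact ⟨p, hp, hpm⟩
    obtain ⟨p0, hp0b, hp0m⟩ := hmem
    set tmps := (items.filter (fun p => decide (PySem.Str.len p.1 = c ∧ p.2 ≥ 2))).map
        (fun p => (p.2, p.1)) with htmps
    have hp0t : ((p0.2, p0.1) : Int × String) ∈ tmps := by
      rw [htmps, hfilt]
      exact List.mem_map_of_mem (List.mem_filter.2 ⟨hp0b, by simp; omega⟩)
    have htub : ∀ t ∈ tmps, t.1 ≤ m := by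
      intro t ht
      rw [htmps, hfilt] at ht
      rcases List.mem_map.1 ht with ⟨p, hp, rfl⟩
      exact hub p (List.mem_filter.1 hp).1
    have hstperm : (PySem.List.sorted2 tmps (fun t => t.1) (fun t => t.2) true).Perm tmps :=
      PySem.List.sorted2_perm _ _ _ _
    have hpair := sorted2_rev_pairwise_fst tmps
    rcases hste : PySem.List.sorted2 tmps (fun t => t.1) (fun t => t.2) true with _ | ⟨t0, rest⟩
    · rw [hste] at hstperm
      have : tmps = [] := hstperm.symm.eq_nil
      rw [this] at hp0t
      simp at hp0t
    · rw [hste] at hstperm hpair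
      -- head value is m
      have ht0mem : t0 ∈ tmps := hstperm.mem_iff.1 List.mem_cons_self
      have ht0le : t0.1 ≤ m := htub _ ht0mem
      have ht0ge : m ≤ t0.1 := by
        have hmemst : ((p0.2, p0.1) : Int × String) ∈ t0 :: rest := hstperm.mem_iff.2 hp0t
        rcases List.mem_cons.1 hmemst with heq | hmemrest
        · rw [← heq]; simp [hp0m]
        · have := (List.pairwise_cons.1 hpair).1 _ hmemrest
          simp only at this
          rw [hp0m] at this
          exact this
      have ht01 : t0.1 = m := le_antisymm ht0le ht0ge
      show (List.map (fun t => t.2)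
          (List.takeWhile (fun t => !decide (t.1 < t0.1)) (t0 :: rest))).Perm
        (if m ≥ 2 then List.map (fun p => p.1) (List.filter (fun p => p.2 == m) bucket) else [])
      rw [ht01, takeWhile_eq_filter_of_desc m _ hpair]
      have hfc : (t0 :: rest).filter (fun t => decide (m ≤ t.1))
          = (t0 :: rest).filter (fun t => decide (t.1 = m)) := by
        apply List.filter_congr
        intro t ht
        have := htub t (hstperm.mem_iff.1 ht)
        by_cases he : t.1 = m
        · simp [he]
        · simp [he]; omega
      rw [hfc, if_pos hm2]
      refine List.Perm.trans (List.Perm.map _ (hstperm.filter _)) ?_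
      have : (tmps.filter (fun t => decide (t.1 = m))).map (fun t => t.2)
          = (bucket.filter (fun p => p.2 == m)).map (fun p => p.1) := by
        rw [htmps, hfilt, List.filter_map]
        have hcomp : ((fun (t : Int × String) => decide (t.1 = m)) ∘ (fun (p : String × Int) => (p.2, p.1)))
            = fun (p : String × Int) => decide (p.2 = m) := rfl
        rw [hcomp, List.filter_filter]
        have hpred : ∀ p ∈ bucket, (decide (p.2 = m) && decide ((2 : Int) ≤ p.2)) = (p.2 == m) := by
          intro p hp
          by_cases he : p.2 = m
          · simp [he]; omega
          · simp [he, intBeq]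
        rw [List.filter_congr hpred, List.map_map]
        rfl
      rw [this]
  · -- empty or all-singleton bucket: both sides are []
    have htmps : items.filter (fun p => decide (PySem.Str.len p.1 = c ∧ p.2 ≥ 2)) = [] := by
      rw [hfilt, List.filter_eq_nil_iff]
      intro p hp
      have := hub p hp
      simp only [decide_eq_true_eq]
      omega
    rw [if_neg hm2, htmps]
    simp [PySem.List.sorted2]

lemma segA_body (items : List (String × Int)) (c : Int) (acc : List String)
    (tmps : List (Int × String))
    (h : tmps = (items.filter (fun p => decide (PySem.Str.len p.1 = c ∧ p.2 ≥ 2))).map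
        (fun p => (p.2, p.1))) :
    (match PySem.List.sorted2 tmps (fun t => t.1) (fun t => t.2) true with
     | [] => acc
     | t0 :: _ =>
        solAppendLoop t0.1 (PySem.List.sorted2 tmps (fun t => t.1) (fun t => t.2) true) acc)
      = acc ++ segA items c := by
  simp only [segA, ← h]
  cases hst : PySem.List.sorted2 tmps (fun t => t.1) (fun t => t.2) true with
  | nil => simp
  | cons t0 rest =>
    show solAppendLoop t0.1 (t0 :: rest) acc
        = acc ++ (List.map (fun t => t.2)
            (List.takeWhile (fun t => !decide (t.1 < t0.1)) (t0 :: rest)))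
    rw [solAppendLoop_eq]

lemma solution_eq_seg (orders : List String) (course : List Int) :
    solution orders course =
      PySem.List.sorted (course.foldl (fun a c => a ++ segA (solAltPhase1 orders).toList c) [])
        (fun x => x) false := by
  simp only [solution]
  rw [solPhase1_eq]
  congr 1
  apply PySem.List.foldl_congr_mem
  intro acc c _
  rw [tmps_eq]
  exact segA_body _ c acc _ rfl

lemma solution_alt_eq_seg (orders : List String) (course : List Int) :
    solution_alt orders course =
      PySem.List.sorted (course.foldl (fun a c => a ++ segB (solAltPhase1 orders).toList c) [])
        (fun x => x) false := by
  simp only [solution_alt]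
  congr 1
  apply PySem.List.foldl_congr_mem
  intro acc c _
  rw [bucket_eq]
  simp only [segB]
  by_cases h : (2 : Int) ≤ ((solAltPhase1 orders).toList.filter
      (fun p => PySem.Str.len p.1 == c)).foldl (fun m p => if p.2 > m then p.2 else m) 0
  · rw [if_pos h, if_pos h]
  · rw [if_neg h, if_neg h, List.append_nil]

lemma fold_seg_perm (items : List (String × Int)) (course : List Int) :
    ∀ (a b : List String), a.Perm b →
      (course.foldl (fun a c => a ++ segA items c) a).Perm
        (course.foldl (fun a c => a ++ segB items c) b) := by
  induction course with
  | nil => intro a b hab; simpa using hab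
  | cons c cs ih =>
    intro a b hab
    exact ih _ _ (hab.append (seg_perm items c))

-- ===== VERDICT (by name: the statement is the Claim_ definition above) =====
theorem solution_spec : Claim_equal_solution := by
  intro orders course _
  unfold Spec_solution
  rw [solution_eq_seg, solution_alt_eq_seg]
  rw [PySem.List.sorted_id_eq_sorted_id_iff_perm]
  exact fold_seg_perm _ course [] [] (List.Perm.refl _)
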